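-- pv_equiv track=rewrite | github.com/DDJekal/CreativeAI_refactoring | main.py | validate_layout_type_specific_rules
-- ===== SOURCE A (Python) =====
-- def validate_layout_type_specific_rules(layout_data, rules):
--     """Validiert layout-typspezifische Regeln (weniger streng)"""
--     zones = layout_data.get('zones', {})
--     validation_results = []
--
--     # Grundlegende Regeln (nur echte Probleme als Fehler markieren)
--     if 'min_total_zones' in rules:
--         if len(zones) < rules['min_total_zones']:
--             validation_results.append({
--                 'rule': 'min_total_zones',
--                 'status': 'warning',  # Nur Warnung, kein Fehler
--                 'message': f"Layout hat {len(zones)} Zonen (empfohlen: {rules['min_total_zones']}+)"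
--             })
--
--     if 'max_total_zones' in rules:
--         if len(zones) > rules['max_total_zones']:
--             validation_results.append({
--                 'rule': 'max_total_zones',
--                 'status': 'info',  # Nur Info, keine Warnung
--                 'message': f"Layout hat {len(zones)} Zonen (typisch: {rules['max_total_zones']})"
--             })
--
--     # Storytelling-spezifische Regeln (weniger streng)
--     if 'text_flow_required' in rules and rules['text_flow_required']:
--         text_zones = [z for z in zones.values() if z.get('content_type') == 'text_elements']
--         if len(text_zones) < 2:  # Reduziert von 3 auf 2
--             validation_results.append({
--                 'rule': 'text_flow_required',
--                 'status': 'info',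
--                 'message': f"Storytelling-Layout hat {len(text_zones)} Text-Zonen (empfohlen: 2+)"
--             })
--
--     # Infographic-spezifische Regeln (weniger streng)
--     if 'hierarchy_required' in rules and rules['hierarchy_required']:
--         data_zones = [z for z in zones.values() if z.get('content_type') in ['text_elements', 'data_elements']]
--         if len(data_zones) < 1:  # Reduziert von 2 auf 1
--             validation_results.append({
--                 'rule': 'hierarchy_required',
--                 'status': 'info',
--                 'message': f"Infographic-Layout hat {len(data_zones)} Daten-Zonen (empfohlen: 1+)"
--             })
--
--     # Hero-spezifische Regeln (weniger streng)
--     if 'hero_focus_required' in rules and rules['hero_focus_required']: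
--         image_zones = [z for z in zones.values() if z.get('content_type') == 'image_motiv']
--         if len(image_zones) < 1:
--             validation_results.append({
--                 'rule': 'hero_focus_required',
--                 'status': 'info',
--                 'message': "Hero-Layout empfiehlt mindestens 1 Bild-Zone"
--             })
--
--     return validation_results
-- ===== SOURCE B (Python) =====
-- def validate_layout_type_specific_rules(layout_data, rules):
--     """Validates layout-type-specific rules via a single counting pass over zones."""
--     zones = layout_data.get('zones', {})
--     n = len(zones)
--     results = []
--
--     if 'min_total_zones' in rules and n < rules['min_total_zones']:
--         results.append({
--             'rule': 'min_total_zones',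
--             'status': 'warning',
--             'message': f"Layout hat {n} Zonen (empfohlen: {rules['min_total_zones']}+)"
--         })
--
--     if 'max_total_zones' in rules and n > rules['max_total_zones']:
--         results.append({
--             'rule': 'max_total_zones',
--             'status': 'info',
--             'message': f"Layout hat {n} Zonen (typisch: {rules['max_total_zones']})"
--         })
--
--     flow = rules.get('text_flow_required')
--     hier = rules.get('hierarchy_required')
--     hero = rules.get('hero_focus_required')
--
--     if flow or hier or hero:
--         # one pass: tabulate content types
--         counts = {}
--         for z in zones.values():
--             ct = z.get('content_type')
--             counts[ct] = counts.get(ct, 0) + 1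
--         text_count = counts.get('text_elements', 0)
--         data_count = counts.get('text_elements', 0) + counts.get('data_elements', 0)
--         image_count = counts.get('image_motiv', 0)
--
--         if flow and text_count < 2:
--             results.append({
--                 'rule': 'text_flow_required',
--                 'status': 'info',
--                 'message': f"Storytelling-Layout hat {text_count} Text-Zonen (empfohlen: 2+)"
--             })
--
--         if hier and data_count < 1:
--             results.append({
--                 'rule': 'hierarchy_required',
--                 'status': 'info',
--                 'message': f"Infographic-Layout hat {data_count} Daten-Zonen (empfohlen: 1+)"
--             })
--
--         if hero and image_count < 1:
--             results.append({
--                 'rule': 'hero_focus_required',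
--                 'status': 'info',
--                 'message': "Hero-Layout empfiehlt mindestens 1 Bild-Zone"
--             })
--
--     return results
-- ===== Notes on version B (the rewrite author's own statement) =====
-- stated objective: alternative
-- what changed: Replaces A's three separate filtering comprehensions over zones.values() by a single counting pass that builds a content-type table (guarded to run only when one of the three flag rules is truthy), from which text/data/image counts are read off.
import Mathlib
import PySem

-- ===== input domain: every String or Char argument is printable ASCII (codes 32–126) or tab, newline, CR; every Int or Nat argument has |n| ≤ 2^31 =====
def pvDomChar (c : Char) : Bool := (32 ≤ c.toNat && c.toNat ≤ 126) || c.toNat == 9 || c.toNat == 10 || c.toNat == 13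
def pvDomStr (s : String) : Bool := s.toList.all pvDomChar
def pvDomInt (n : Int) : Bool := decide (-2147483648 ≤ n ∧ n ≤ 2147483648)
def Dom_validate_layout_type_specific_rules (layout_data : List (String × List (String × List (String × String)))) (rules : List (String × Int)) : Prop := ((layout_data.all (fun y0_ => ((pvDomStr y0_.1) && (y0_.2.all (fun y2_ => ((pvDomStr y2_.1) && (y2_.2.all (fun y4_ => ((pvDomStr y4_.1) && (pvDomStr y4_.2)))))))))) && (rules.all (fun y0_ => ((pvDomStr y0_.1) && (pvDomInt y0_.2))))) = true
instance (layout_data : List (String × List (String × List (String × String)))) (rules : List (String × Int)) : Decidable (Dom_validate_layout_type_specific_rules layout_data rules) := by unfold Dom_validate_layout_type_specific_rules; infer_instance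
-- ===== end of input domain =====

-- B replaces A's three comprehension scans over zones.values() by one counting pass building a
-- content-type table, guarded so it only runs when one of the three flags is truthy (objective: alternative).

-- ===== PORT A =====
def validate_layout_type_specific_rules (layout_data : List (String × List (String × List (String × String)))) (rules : List (String × Int)) : List (List (String × String)) :=
  let zones := PySem.Dict.ofList ((PySem.Dict.ofList layout_data).getD "zones" [])
  let rulesD := PySem.Dict.ofList rules
  let r1 : List (List (String × String)) :=
    if rulesD.contains "min_total_zones" then
      (if decide ((zones.size : Int) < rulesD.getD "min_total_zones" 0) then
        [[("rule", "min_total_zones"), ("status", "warning"),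
          ("message", "Layout hat " ++ PySem.Int.toStr (zones.size : Int) ++ " Zonen (empfohlen: " ++ PySem.Int.toStr (rulesD.getD "min_total_zones" 0) ++ "+)")]]
      else [])
    else []
  let r2 : List (List (String × String)) :=
    if rulesD.contains "max_total_zones" then
      (if decide ((zones.size : Int) > rulesD.getD "max_total_zones" 0) then
        [[("rule", "max_total_zones"), ("status", "info"),
          ("message", "Layout hat " ++ PySem.Int.toStr (zones.size : Int) ++ " Zonen (typisch: " ++ PySem.Int.toStr (rulesD.getD "max_total_zones" 0) ++ ")")]]
      else [])
    else []
  let r3 : List (List (String × String)) :=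
    if rulesD.contains "text_flow_required" && decide (rulesD.getD "text_flow_required" 0 ≠ 0) then
      (let text_zones := zones.values.filter (fun z => (PySem.Dict.ofList z).get? "content_type" == some "text_elements")
      if decide ((text_zones.length : Int) < 2) then
        [[("rule", "text_flow_required"), ("status", "info"),
          ("message", "Storytelling-Layout hat " ++ PySem.Int.toStr (text_zones.length : Int) ++ " Text-Zonen (empfohlen: 2+)")]]
      else [])
    else []
  let r4 : List (List (String × String)) :=
    if rulesD.contains "hierarchy_required" && decide (rulesD.getD "hierarchy_required" 0 ≠ 0) then
      (let data_zones := zones.values.filter (fun z => (PySem.Dict.ofList z).get? "content_type" == some "text_elements" || (PySem.Dict.ofList z).get? "content_type" == some "data_elements")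
      if decide ((data_zones.length : Int) < 1) then
        [[("rule", "hierarchy_required"), ("status", "info"),
          ("message", "Infographic-Layout hat " ++ PySem.Int.toStr (data_zones.length : Int) ++ " Daten-Zonen (empfohlen: 1+)")]]
      else [])
    else []
  let r5 : List (List (String × String)) :=
    if rulesD.contains "hero_focus_required" && decide (rulesD.getD "hero_focus_required" 0 ≠ 0) then
      (let image_zones := zones.values.filter (fun z => (PySem.Dict.ofList z).get? "content_type" == some "image_motiv")
      if decide ((image_zones.length : Int) < 1) then
        [[("rule", "hero_focus_required"), ("status", "info"),
          ("message", "Hero-Layout empfiehlt mindestens 1 Bild-Zone")]]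
      else [])
    else []
  r1 ++ r2 ++ r3 ++ r4 ++ r5

-- ===== PORT B =====
-- truthiness of rules.get(k): missing key (None) is falsy, an int is truthy iff nonzero
def pvTruthyOptInt : Option Int → Bool
  | none => false
  | some v => v != 0

def validate_layout_type_specific_rules_alt (layout_data : List (String × List (String × List (String × String)))) (rules : List (String × Int)) : List (List (String × String)) :=
  let zones := PySem.Dict.ofList ((PySem.Dict.ofList layout_data).getD "zones" [])
  let rulesD := PySem.Dict.ofList rules
  let n : Int := (zones.size : Int)
  let r1 : List (List (String × String)) :=
    if rulesD.contains "min_total_zones" && decide (n < rulesD.getD "min_total_zones" 0) then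
      [[("rule", "min_total_zones"), ("status", "warning"),
        ("message", "Layout hat " ++ PySem.Int.toStr n ++ " Zonen (empfohlen: " ++ PySem.Int.toStr (rulesD.getD "min_total_zones" 0) ++ "+)")]]
    else []
  let r2 : List (List (String × String)) :=
    if rulesD.contains "max_total_zones" && decide (n > rulesD.getD "max_total_zones" 0) then
      [[("rule", "max_total_zones"), ("status", "info"),
        ("message", "Layout hat " ++ PySem.Int.toStr n ++ " Zonen (typisch: " ++ PySem.Int.toStr (rulesD.getD "max_total_zones" 0) ++ ")")]]
    else []
  let flow := pvTruthyOptInt (rulesD.get? "text_flow_required")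
  let hier := pvTruthyOptInt (rulesD.get? "hierarchy_required")
  let hero := pvTruthyOptInt (rulesD.get? "hero_focus_required")
  let rest : List (List (String × String)) :=
    if flow || hier || hero then
      -- one pass: tabulate content types
      let counts : PySem.Dict (Option String) Int :=
        zones.values.foldl (fun d z =>
          let ct := (PySem.Dict.ofList z).get? "content_type"
          d.insert ct (d.getD ct 0 + 1)) PySem.Dict.empty
      let text_count := counts.getD (some "text_elements") 0
      let data_count := counts.getD (some "text_elements") 0 + counts.getD (some "data_elements") 0
      let image_count := counts.getD (some "image_motiv") 0
      (if flow && decide (text_count < 2) then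
        [[("rule", "text_flow_required"), ("status", "info"),
          ("message", "Storytelling-Layout hat " ++ PySem.Int.toStr text_count ++ " Text-Zonen (empfohlen: 2+)")]]
      else []) ++
      (if hier && decide (data_count < 1) then
        [[("rule", "hierarchy_required"), ("status", "info"),
          ("message", "Infographic-Layout hat " ++ PySem.Int.toStr data_count ++ " Daten-Zonen (empfohlen: 1+)")]]
      else []) ++
      (if hero && decide (image_count < 1) then
        [[("rule", "hero_focus_required"), ("status", "info"),
          ("message", "Hero-Layout empfiehlt mindestens 1 Bild-Zone")]]
      else [])
    else []
  r1 ++ r2 ++ rest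

-- ===== PRECONDITION & SPEC =====
def Spec_validate_layout_type_specific_rules (layout_data : List (String × List (String × List (String × String)))) (rules : List (String × Int)) (out : List (List (String × String))) : Prop := out = validate_layout_type_specific_rules_alt layout_data rules
instance (layout_data : List (String × List (String × List (String × String)))) (rules : List (String × Int)) (out : List (List (String × String))) : Decidable (Spec_validate_layout_type_specific_rules layout_data rules out) := by unfold Spec_validate_layout_type_specific_rules; infer_instance

-- ===== CLAIM (what is proved, stated in full; the proofs are below) =====
def Claim_equal_validate_layout_type_specific_rules : Prop := ∀ (layout_data : List (String × List (String × List (String × String)))) (rules : List (String × Int)), Dom_validate_layout_type_specific_rules layout_data rules → Spec_validate_layout_type_specific_rules layout_data rules (validate_layout_type_specific_rules layout_data rules)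

-- ===== LEMMAS AND PROOFS =====

-- a flag tested as `'k' in rules and rules['k']` (A) equals the truthiness of rules.get(k) (B)
theorem truthy_eq_contains_and {κ : Type} [BEq κ] [LawfulBEq κ] (d : PySem.Dict κ Int) (k : κ) :
    pvTruthyOptInt (d.get? k) = (d.contains k && decide (d.getD k 0 ≠ 0)) := by
  rw [PySem.Dict.contains_eq_isSome_get?, PySem.Dict.getD_eq_get?_getD]
  cases h : d.get? k with
  | none => simp [pvTruthyOptInt]
  | some v => by_cases hv : v = 0 <;> simp [pvTruthyOptInt, bne, hv]

-- the counting pass reads off the length of the corresponding filter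
theorem count_map_eq_filter_length {α β : Type} [BEq β] [LawfulBEq β] (f : α → β) (l : List α) (k : β) :
    (l.map f).count k = (l.filter (fun z => f z == k)).length := by
  induction l with
  | nil => rfl
  | cons x xs ih =>
    by_cases h : f x = k <;> simp [h, ih]

theorem counter_getD (l : List (List (String × String))) (k : Option String) :
    (l.foldl (fun d z =>
        let ct := (PySem.Dict.ofList z).get? "content_type"
        d.insert ct (d.getD ct 0 + 1)) (PySem.Dict.empty : PySem.Dict (Option String) Int)).getD k 0
      = ((l.filter (fun z => (PySem.Dict.ofList z).get? "content_type" == k)).length : Int) := by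
  have h1 : (l.foldl (fun d z =>
        let ct := (PySem.Dict.ofList z).get? "content_type"
        d.insert ct (d.getD ct 0 + 1)) (PySem.Dict.empty : PySem.Dict (Option String) Int))
      = ((l.map (fun z => (PySem.Dict.ofList z).get? "content_type")).foldl
          (fun d x => d.insert x (d.getD x 0 + 1)) PySem.Dict.empty) := by
    rw [List.foldl_map]
  rw [h1, PySem.Dict.getD_foldl_insert_add_one, PySem.Dict.getD_empty,
      count_map_eq_filter_length]
  ring

-- a filter on a disjunction of two distinct keys splits into a sum of filter lengths
theorem filter_or_length {α β : Type} [BEq β] [LawfulBEq β] (f : α → β) (l : List α) (a b : β) (hab : a ≠ b) :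
    (l.filter (fun z => f z == a || f z == b)).length
      = (l.filter (fun z => f z == a)).length + (l.filter (fun z => f z == b)).length := by
  induction l with
  | nil => rfl
  | cons x xs ih =>
    have hab' : (a == b) = false := by simpa using hab
    have hba' : (b == a) = false := by simpa using Ne.symm hab
    by_cases ha : f x = a
    · simp [ha, hab', ih]; omega
    · by_cases hb : f x = b
      · simp [hb, hba', ih]; omega
      · simp [ha, hb, ih]

-- an if over a conjunction of Booleans is the nested if
theorem if_and {α : Type} (a b : Bool) (x : List α) :
    (if a && b then x else []) = (if a then (if b then x else []) else []) := by
  cases a <;> simp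

-- the guard `flow or hier or hero` around the three appended blocks is redundant
theorem rest_guard {α : Type} (c1 d1 c2 d2 c3 d3 : Bool) (x y z : List α) :
    (if (c1 && d1 || c2 && d2 || c3 && d3) then
        ((if c1 then if d1 then x else [] else []) ++ (if c2 then if d2 then y else [] else [])) ++
          (if c3 then if d3 then z else [] else [])
      else [])
      = ((if c1 then if d1 then x else [] else []) ++ (if c2 then if d2 then y else [] else [])) ++
          (if c3 then if d3 then z else [] else []) := by
  cases c1 <;> cases d1 <;> cases c2 <;> cases d2 <;> cases c3 <;> cases d3 <;> simp

-- ===== VERDICT (by name: the statement is the Claim_ definition above) =====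
theorem validate_layout_type_specific_rules_spec : Claim_equal_validate_layout_type_specific_rules := by
  intro layout_data rules _
  show _ = _
  unfold validate_layout_type_specific_rules validate_layout_type_specific_rules_alt
  simp only [truthy_eq_contains_and, counter_getD]
  rw [filter_or_length _ _ (some "text_elements") (some "data_elements") (by decide)]
  simp only [if_and]
  rw [rest_guard]
  push_cast
  simp [List.append_assoc]
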